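-- pv_equiv track=rewrite | github.com/DCP-Project/minnow-prototype | server/parser.py | len_kv
-- ===== SOURCE A (Python) =====
-- def len_kv(kval):
--     if not kval:
--         return 0
--
--     l = 0
--     for k, v in kval.items():
--         # Each key: val pair introduces at least 6 bytes overhead
--         l += 6 + len(k)
--
--         # Each value adds at least 3 chars of overhead per item
--         for v2 in v:
--             l += 3 + len(v2)
--
--         # Adjust for trailing comma
--         l -= 1
--
--     # Trailing comma
--     l -= 1
--     return l
-- ===== SOURCE B (Python) =====
-- def len_kv(kval):
--     if not kval:
--         return 0
--     n = len(kval)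
--     m = sum(1 for v in kval.values() for _ in v)
--     sum_key_len = sum(len(k) for k in kval)
--     sum_val_len = sum(len(v2) for v in kval.values() for v2 in v)
--     return 5 * n + sum_key_len + 3 * m + sum_val_len - 1
-- ===== Notes on version B (the rewrite author's own statement) =====
-- stated objective: alternative
-- what changed: Replaces the interleaved accumulator loop (per-key overhead, nested per-value additions, trailing-comma adjustments) with a closed-form arithmetic combination of four flat aggregates: 5*len(kval) + sum of key lengths + 3*(number of value items) + sum of value-item lengths - 1.
import Mathlib
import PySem

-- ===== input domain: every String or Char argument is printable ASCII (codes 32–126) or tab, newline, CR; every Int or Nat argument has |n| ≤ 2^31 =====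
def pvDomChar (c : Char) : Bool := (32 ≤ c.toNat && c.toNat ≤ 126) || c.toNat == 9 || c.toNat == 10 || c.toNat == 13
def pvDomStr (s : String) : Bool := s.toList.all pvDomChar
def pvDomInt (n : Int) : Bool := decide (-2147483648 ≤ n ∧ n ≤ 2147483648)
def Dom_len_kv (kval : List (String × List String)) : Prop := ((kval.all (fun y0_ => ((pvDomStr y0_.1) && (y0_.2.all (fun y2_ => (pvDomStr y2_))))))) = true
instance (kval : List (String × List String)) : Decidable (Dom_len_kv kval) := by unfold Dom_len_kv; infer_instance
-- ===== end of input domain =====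

-- B replaces A's interleaved accumulator loop with a closed-form combination of flat aggregates (same cost; objective: alternative).


-- ===== PORT A =====
def len_kv (kval : List (String × List String)) : Int :=
  if kval = [] then 0
  else
    (kval.foldl
      (fun l kv =>
        ((kv.2.foldl (fun l2 v2 => l2 + (3 + PySem.Str.len v2))
            (l + (6 + PySem.Str.len kv.1))) - 1))
      0) - 1

-- ===== PORT B =====
def len_kv_alt (kval : List (String × List String)) : Int :=
  if kval = [] then 0
  else
    let n : Int := PySem.List.len kval
    let m : Int := (kval.map (fun kv => kv.2.foldl (fun a _ => a + 1) 0)).foldl (· + ·) 0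
    let sumKeyLen : Int := (kval.map (fun kv => PySem.Str.len kv.1)).foldl (· + ·) 0
    let sumValLen : Int := (kval.map (fun kv => (kv.2.map PySem.Str.len).foldl (· + ·) 0)).foldl (· + ·) 0
    5 * n + sumKeyLen + 3 * m + sumValLen - 1

-- ===== PRECONDITION & SPEC =====
def Spec_len_kv (kval : List (String × List String)) (out : Int) : Prop := out = len_kv_alt kval
instance (kval : List (String × List String)) (out : Int) : Decidable (Spec_len_kv kval out) := by unfold Spec_len_kv; infer_instance

-- ===== CLAIM (what is proved, stated in full; the proofs are below) =====
def Claim_equal_len_kv : Prop := ∀ (kval : List (String × List String)), Dom_len_kv kval → Spec_len_kv kval (len_kv kval)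

-- ===== LEMMAS AND PROOFS =====

def pvContrib (kv : String × List String) : Int :=
  5 + PySem.Str.len kv.1 + (kv.2.map (fun v2 => 3 + PySem.Str.len v2)).sum

theorem pvInnerA (v : List String) (l : Int) :
    v.foldl (fun l2 v2 => l2 + (3 + PySem.Str.len v2)) l
      = l + (v.map (fun v2 => 3 + PySem.Str.len v2)).sum := by
  induction v generalizing l with
  | nil => simp
  | cons h t ih => simp only [List.foldl_cons, List.map_cons, List.sum_cons, ih]; ring

theorem pvOuterA (kval : List (String × List String)) (l : Int) :
    kval.foldl
      (fun l kv =>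
        ((kv.2.foldl (fun l2 v2 => l2 + (3 + PySem.Str.len v2))
            (l + (6 + PySem.Str.len kv.1))) - 1))
      l = l + (kval.map pvContrib).sum := by
  induction kval generalizing l with
  | nil => simp
  | cons h t ih =>
    rw [List.foldl_cons, ih, pvInnerA]
    simp only [List.map_cons, List.sum_cons, pvContrib]
    ring

theorem pvFoldAdd (xs : List Int) (l : Int) : xs.foldl (· + ·) l = l + xs.sum := by
  induction xs generalizing l with
  | nil => simp
  | cons h t ih => simp only [List.foldl_cons, ih, List.sum_cons]; ring

theorem pvCount (v : List String) (a : Int) : v.foldl (fun a _ => a + 1) a = a + v.length := by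
  induction v generalizing a with
  | nil => simp
  | cons h t ih => simp only [List.foldl_cons, ih, List.length_cons]; push_cast; ring

theorem pvInnerSum (v : List String) :
    (v.map (fun v2 => 3 + PySem.Str.len v2)).sum
      = 3 * (v.length : Int) + (v.map PySem.Str.len).sum := by
  induction v with
  | nil => simp
  | cons h t ih => simp only [List.map_cons, List.sum_cons, ih, List.length_cons]; push_cast; ring

theorem pvContribSum (kval : List (String × List String)) :
    (kval.map pvContrib).sum
      = 5 * (kval.length : Int)
        + (kval.map (fun kv => PySem.Str.len kv.1)).sum
        + 3 * (kval.map (fun kv => (kv.2.length : Int))).sum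
        + (kval.map (fun kv => (kv.2.map PySem.Str.len).sum)).sum := by
  induction kval with
  | nil => simp
  | cons h t ih =>
    simp only [List.map_cons, List.sum_cons, ih, pvContrib, pvInnerSum, List.length_cons]
    push_cast; ring

-- ===== VERDICT (by name: the statement is the Claim_ definition above) =====
theorem len_kv_spec : Claim_equal_len_kv := by
  intro kval _
  unfold Spec_len_kv len_kv len_kv_alt
  by_cases h : kval = []
  · simp [h]
  · simp only [h, if_false]
    rw [pvOuterA, pvContribSum]
    simp only [pvFoldAdd, pvCount, PySem.List.len_eq, zero_add]
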